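-- pv_equiv track=rewrite | github.com/hongzhonglu/scYeast | zero_shot/gene_embedding_analysis.py | find_state_specific_genes
-- ===== SOURCE A (Python) =====
-- def find_state_specific_genes(gene_sets):
--     state_specific_genes = {}
--     states = list(gene_sets.keys())
--
--     for i, state in enumerate(states):
--         # 创建其他状态的并集
--         other_states_genes = set().union(*[gene_sets[other_state] for other_state in states[:i] + states[i + 1:]])
--
--         # 找出仅存在于当前状态的基因
--         specific_genes = gene_sets[state] - other_states_genes
--         state_specific_genes[state] = specific_genes
--
--     return state_specific_genes
-- ===== SOURCE B (Python) =====
-- def find_state_specific_genes(gene_sets):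
--     # One pass: count in how many states each gene occurs; a gene is
--     # state-specific iff its total count is 1.
--     count = {}
--     for genes in gene_sets.values():
--         for g in genes:
--             count[g] = count.get(g, 0) + 1
--     return {state: {g for g in genes if count[g] == 1}
--             for state, genes in gene_sets.items()}
-- ===== Notes on version B (the rewrite author's own statement) =====
-- stated objective: faster
-- what changed: Instead of rebuilding, for every state, the union of all other states' gene sets (O(S) unions of total size O(S*N)), B counts each gene's number of occurrences across all states in one pass and keeps the genes with count 1.
import Mathlib
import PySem

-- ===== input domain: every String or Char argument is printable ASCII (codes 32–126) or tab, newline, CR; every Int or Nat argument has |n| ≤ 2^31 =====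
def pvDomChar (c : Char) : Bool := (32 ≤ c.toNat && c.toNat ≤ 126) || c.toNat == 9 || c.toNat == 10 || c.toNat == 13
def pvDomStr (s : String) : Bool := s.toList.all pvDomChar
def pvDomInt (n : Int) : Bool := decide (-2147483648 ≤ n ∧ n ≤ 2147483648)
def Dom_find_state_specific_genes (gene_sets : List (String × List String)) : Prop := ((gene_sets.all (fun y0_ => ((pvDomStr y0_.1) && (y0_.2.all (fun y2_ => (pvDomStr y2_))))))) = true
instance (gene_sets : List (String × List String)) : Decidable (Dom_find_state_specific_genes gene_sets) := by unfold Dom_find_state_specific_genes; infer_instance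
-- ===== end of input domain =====

-- B replaces A's per-state union of all the OTHER states' gene sets by one global
-- occurrence count over all states: a gene is state-specific iff its count is 1 (objective: faster).

-- ===== PORT A =====
-- the loop 'for i, state in enumerate(states)' with the slices states[:i] / states[i+1:]:
-- prev carries states[:i] (the already-processed keys), rest is state :: states[i+1:]
def pvGoA (d : PySem.Dict String (List String)) (prev : List String)
    (rest : List String) (acc : PySem.Dict String (List String)) :
    PySem.Dict String (List String) :=
  match rest with
  | [] => acc
  | state :: rest' =>
    -- set().union(*[gene_sets[other] for other in states[:i] + states[i+1:]])
    let others := (prev ++ rest').foldl (fun u st => PySem.Set.union u (d.getD st [])) PySem.Set.empty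
    -- gene_sets[state] - other_states_genes  (d.getD is exact: state ∈ keys, no KeyError)
    let specific := PySem.Set.diff (d.getD state []) others
    pvGoA d (prev ++ [state]) rest' (acc.insert state specific)

def find_state_specific_genes (gene_sets : List (String × List String)) : List (String × List String) :=
  let d : PySem.Dict String (List String) := PySem.Dict.mk gene_sets
  (pvGoA d [] d.keys PySem.Dict.empty).items

-- ===== PORT B =====
def find_state_specific_genes_alt (gene_sets : List (String × List String)) : List (String × List String) :=
  let count : PySem.Dict String Int :=
    gene_sets.foldl (fun d p => p.2.foldl (fun d g => d.insert g (d.getD g 0 + 1)) d) PySem.Dict.empty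
  gene_sets.map (fun p => (p.1, p.2.filter (fun g => count.getD g 0 == 1)))

-- ===== PRECONDITION & SPEC =====
-- Pre_ excludes association lists with a duplicate state key or a duplicate gene inside one
-- value list: such lists do not faithfully encode A's dict-of-sets argument (Python collapses
-- the duplicates before A even runs, so both Pythons trivially agree there, but no port of
-- either program can see the collapse).
def Pre_find_state_specific_genes (gene_sets : List (String × List String)) : Prop :=
  (gene_sets.map Prod.fst).Nodup ∧ ∀ p ∈ gene_sets, p.2.Nodup
instance (gene_sets : List (String × List String)) : Decidable (Pre_find_state_specific_genes gene_sets) := by unfold Pre_find_state_specific_genes; infer_instance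
def pvWitness_find_state_specific_genes : (List (String × List String)) :=
  [("a", ["x", "y"]), ("b", ["y", "z"])]

def Spec_find_state_specific_genes (gene_sets : List (String × List String)) (out : List (String × List String)) : Prop := out = find_state_specific_genes_alt gene_sets
instance (gene_sets : List (String × List String)) (out : List (String × List String)) : Decidable (Spec_find_state_specific_genes gene_sets out) := by unfold Spec_find_state_specific_genes; infer_instance

-- ===== CLAIM (what is proved, stated in full; the proofs are below) =====
def Claim_equal_find_state_specific_genes : Prop := ∀ (gene_sets : List (String × List String)), Dom_find_state_specific_genes gene_sets → Pre_find_state_specific_genes gene_sets → Spec_find_state_specific_genes gene_sets (find_state_specific_genes gene_sets)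

-- ===== LEMMAS AND PROOFS =====

-- B's nested counting loop computes the global occurrence count
theorem pvCount_getD (gs : List (String × List String)) (d0 : PySem.Dict String Int) (g : String) :
    (gs.foldl (fun d p => p.2.foldl (fun d g => d.insert g (d.getD g 0 + 1)) d) d0).getD g 0
      = d0.getD g 0 + ((gs.flatMap (fun p => p.2)).count g : Int) := by
  induction gs generalizing d0 with
  | nil => simp
  | cons q gs ih =>
    simp only [List.foldl_cons, List.flatMap_cons, List.count_append, ih,
      PySem.Dict.getD_foldl_insert_add_one]
    push_cast; ring

-- membership in A's folded union of gene sets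
theorem pvMem_unionFold (d : PySem.Dict String (List String)) (sts : List String)
    (u : PySem.Set String) (g : String) :
    (g ∈ sts.foldl (fun u st => PySem.Set.union u (d.getD st [])) u)
      ↔ g ∈ u ∨ ∃ st ∈ sts, g ∈ d.getD st [] := by
  induction sts generalizing u with
  | nil => simp
  | cons s sts ih =>
    simp only [List.foldl_cons, ih, PySem.Set.mem_union, List.mem_cons]
    constructor
    · rintro (⟨h | h⟩ | ⟨st, hst, h⟩)
      · exact Or.inl h
      · exact Or.inr ⟨s, Or.inl rfl, h⟩
      · exact Or.inr ⟨st, Or.inr hst, h⟩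
    · rintro (h | ⟨st, (rfl | hst), h⟩)
      · exact Or.inl (Or.inl h)
      · exact Or.inl (Or.inr h)
      · exact Or.inr ⟨st, hst, h⟩

-- the pointwise core: for a gene of state q, "in no other state's set" = "global count is 1"
theorem pvDiff_eq_filter (gs : List (String × List String)) (pre suf : List (String × List String))
    (q : String × List String) (hsplit : gs = pre ++ q :: suf)
    (hk : (gs.map Prod.fst).Nodup) (hv : ∀ p ∈ gs, p.2.Nodup) :
    PySem.Set.diff q.2
        ((pre.map Prod.fst ++ suf.map Prod.fst).foldl
          (fun u st => PySem.Set.union u ((PySem.Dict.mk gs).getD st [])) PySem.Set.empty)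
      = q.2.filter (fun g =>
          (gs.foldl (fun d p => p.2.foldl (fun d g => d.insert g (d.getD g 0 + 1)) d)
            (PySem.Dict.empty : PySem.Dict String Int)).getD g 0 == 1) := by
  have hkeys : (PySem.Dict.mk gs).keys.Nodup := hk
  have hgetD : ∀ p ∈ gs, (PySem.Dict.mk gs).getD p.1 [] = p.2 := by
    intro p hp
    exact PySem.Dict.getD_of_mem_items _ hp hkeys []
  unfold PySem.Set.diff
  apply List.filter_congr
  intro g hg
  have hq : q ∈ gs := by rw [hsplit]; simp
  have hcnt1 : q.2.count g = 1 := List.count_eq_one_of_mem (hv q hq) hg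
  have htot : (gs.flatMap (fun p => p.2)).count g
      = (pre.flatMap (fun p => p.2)).count g + 1 + (suf.flatMap (fun p => p.2)).count g := by
    rw [hsplit]; simp [List.count_append, hcnt1]; ring
  have hexiff : (∃ st ∈ pre.map Prod.fst ++ suf.map Prod.fst, g ∈ (PySem.Dict.mk gs).getD st [])
      ↔ ((pre.flatMap (fun p => p.2)).count g ≠ 0 ∨ (suf.flatMap (fun p => p.2)).count g ≠ 0) := by
    simp only [Ne, List.count_eq_zero, not_not, List.mem_flatMap]
    constructor
    · rintro ⟨st, hst, hgst⟩
      rcases List.mem_append.1 hst with h | h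
      · obtain ⟨p, hp, rfl⟩ := List.mem_map.1 h
        rw [hgetD p (by rw [hsplit]; exact List.mem_append_left _ hp)] at hgst
        exact Or.inl ⟨p, hp, hgst⟩
      · obtain ⟨p, hp, rfl⟩ := List.mem_map.1 h
        rw [hgetD p (by rw [hsplit]; simp [hp])] at hgst
        exact Or.inr ⟨p, hp, hgst⟩
    · rintro (⟨p, hp, hgp⟩ | ⟨p, hp, hgp⟩)
      · exact ⟨p.1, List.mem_append_left _ (List.mem_map_of_mem hp),
          by rw [hgetD p (by rw [hsplit]; exact List.mem_append_left _ hp)]; exact hgp⟩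
      · exact ⟨p.1, List.mem_append_right _ (List.mem_map_of_mem hp),
          by rw [hgetD p (by rw [hsplit]; simp [hp])]; exact hgp⟩
  have hcont : ((pre.map Prod.fst ++ suf.map Prod.fst).foldl
        (fun u st => PySem.Set.union u ((PySem.Dict.mk gs).getD st [])) PySem.Set.empty).contains g = true
      ↔ ((pre.flatMap (fun p => p.2)).count g ≠ 0 ∨ (suf.flatMap (fun p => p.2)).count g ≠ 0) := by
    rw [PySem.Set.contains_iff, pvMem_unionFold, ← hexiff]
    have hemp : g ∉ (PySem.Set.empty : PySem.Set String) := List.not_mem_nil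
    exact or_iff_right hemp
  simp only [pvCount_getD, PySem.Dict.getD_empty, htot]
  rcases hc : ((pre.map Prod.fst ++ suf.map Prod.fst).foldl
      (fun u st => PySem.Set.union u ((PySem.Dict.mk gs).getD st [])) PySem.Set.empty).contains g with _ | _
  · have hzero := (not_iff_not.2 hcont).1 (by rw [hc]; simp)
    rw [not_or, not_ne_iff, not_ne_iff] at hzero
    simp [hzero.1, hzero.2]
  · have hpos := hcont.1 hc
    simp
    omega

-- the loop of A turns the processed prefix into B's per-state filter, state by state
theorem pvGoA_spec (gs : List (String × List String)) (hk : (gs.map Prod.fst).Nodup)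
    (hv : ∀ p ∈ gs, p.2.Nodup) :
    ∀ (suf pre : List (String × List String)) (acc : PySem.Dict String (List String)),
      gs = pre ++ suf →
      (∀ k ∈ suf.map Prod.fst, acc.contains k = false) →
      (pvGoA (PySem.Dict.mk gs) (pre.map Prod.fst) (suf.map Prod.fst) acc).items
        = acc.items ++ suf.map (fun p => (p.1, p.2.filter (fun g =>
            (gs.foldl (fun d p => p.2.foldl (fun d g => d.insert g (d.getD g 0 + 1)) d)
              (PySem.Dict.empty : PySem.Dict String Int)).getD g 0 == 1))) := by
  intro suf
  induction suf with
  | nil => intro pre acc _ _; simp [pvGoA]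
  | cons q suf ih =>
    intro pre acc hsplit hacc
    have hq : q ∈ gs := by rw [hsplit]; simp
    have hkeys : (PySem.Dict.mk gs).keys.Nodup := hk
    have hgetDq : (PySem.Dict.mk gs).getD q.1 [] = q.2 :=
      PySem.Dict.getD_of_mem_items _ hq hkeys []
    have hqnot : q.1 ∉ suf.map Prod.fst := by
      have h1 : (gs.map Prod.fst).Nodup := hk
      rw [hsplit] at h1
      simp only [List.map_append, List.map_cons] at h1
      exact (List.nodup_cons.1 (List.nodup_append.1 h1).2.1).1
    have hins := ih (pre ++ [q]) (acc.insert q.1 (q.2.filter (fun g =>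
            (gs.foldl (fun d p => p.2.foldl (fun d g => d.insert g (d.getD g 0 + 1)) d)
              (PySem.Dict.empty : PySem.Dict String Int)).getD g 0 == 1)))
        (by rw [hsplit]; simp)
        (by
          intro k hkmem
          rw [PySem.Dict.contains_insert]
          have hkq : k ≠ q.1 := fun h => hqnot (h ▸ hkmem)
          simp [hkq, hacc k (List.mem_cons_of_mem _ hkmem)])
    simp only [List.map_append, List.map_cons, List.map_nil] at hins
    simp only [List.map_cons, pvGoA, hgetDq, pvDiff_eq_filter gs pre suf q hsplit hk hv]
    rw [hins, PySem.Dict.items_insert_of_not_contains _ _ (hacc q.1 (by simp))]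
    simp

-- ===== VERDICT (by name: the statement is the Claim_ definition above) =====
theorem find_state_specific_genes_spec : Claim_equal_find_state_specific_genes := by
  intro gs _ hpre
  obtain ⟨hk, hv⟩ := hpre
  unfold Spec_find_state_specific_genes
  simp only [find_state_specific_genes, find_state_specific_genes_alt]
  have h := pvGoA_spec gs hk hv gs [] PySem.Dict.empty (by simp)
    (fun k _ => PySem.Dict.contains_empty k)
  simp only [List.map_nil] at h
  rw [show (PySem.Dict.mk gs).keys = gs.map Prod.fst from rfl, h]
  rfl
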